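-- pv_equiv track=rewrite | github.com/srikrish2812/dsa-python | binary_search/bouquet_form.py | num_bouquets
-- ===== SOURCE A (Python) =====
-- def num_bouquets(arr,k,d):
--     n = len(arr)
--     count = 0
--     bouquets= 0
--     for i in range(n):
--         if arr[i]<=d:
--             count+=1
--             if count==k:
--                 bouquets+=1
--                 count=0
--         else:
--             count = 0
--     return bouquets
-- ===== SOURCE B (Python) =====
-- def num_bouquets(arr, k, d):
--     if k <= 0:
--         return 0
--     runs = []
--     length = 0
--     for x in arr:
--         if x <= d:
--             length += 1
--         else:
--             runs.append(length)
--             length = 0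
--     runs.append(length)
--     return sum(r // k for r in runs)
-- ===== Notes on version B (the rewrite author's own statement) =====
-- stated objective: alternative
-- what changed: B decomposes arr into maximal runs of elements <= d (collected in a list in one pass) and returns the sum of length // k over the runs, instead of A's counter that increments and resets while tallying bouquets inline.
import Mathlib
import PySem

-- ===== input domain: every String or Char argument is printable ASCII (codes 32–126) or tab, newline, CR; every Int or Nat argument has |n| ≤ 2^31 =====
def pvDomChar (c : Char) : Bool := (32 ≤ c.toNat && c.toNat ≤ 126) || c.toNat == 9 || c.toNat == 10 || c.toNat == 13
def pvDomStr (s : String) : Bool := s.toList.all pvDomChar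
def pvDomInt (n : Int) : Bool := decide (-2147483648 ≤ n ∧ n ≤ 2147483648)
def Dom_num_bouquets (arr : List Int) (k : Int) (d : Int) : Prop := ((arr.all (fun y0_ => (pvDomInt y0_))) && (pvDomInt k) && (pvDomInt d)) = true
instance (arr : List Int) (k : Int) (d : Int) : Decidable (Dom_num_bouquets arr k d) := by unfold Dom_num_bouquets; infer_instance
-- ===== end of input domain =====

-- B counts bouquets by splitting arr into maximal runs of elements ≤ d and summing length // k
-- over the runs; A keeps one counter that increments and resets. Equivalence is proved for all inputs.

-- ===== PORT A =====
-- A's loop over range(n) indexing arr[i] visits exactly the elements of arr in order;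
-- state is (count, bouquets), branches in A's order.
def num_bouquets (arr : List Int) (k : Int) (d : Int) : Int :=
  let s := arr.foldl (fun (s : Int × Int) x =>
    if x ≤ d then
      let count := s.1 + 1
      if count = k then (0, s.2 + 1) else (count, s.2)
    else (0, s.2)) (0, 0)
  s.2

-- ===== PORT B =====
-- B's loop builds the list of completed run lengths plus the final open run, then sums r // k.
def num_bouquets_alt (arr : List Int) (k : Int) (d : Int) : Int :=
  if k ≤ 0 then 0
  else
    let s := arr.foldl (fun (s : List Int × Int) x =>
      if x ≤ d then (s.1, s.2 + 1) else (s.1 ++ [s.2], 0)) ([], 0)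
    ((s.1 ++ [s.2]).map (fun r => PySem.Int.floordiv r k)).sum

-- ===== PRECONDITION & SPEC =====
def Spec_num_bouquets (arr : List Int) (k : Int) (d : Int) (out : Int) : Prop := out = num_bouquets_alt arr k d
instance (arr : List Int) (k : Int) (d : Int) (out : Int) : Decidable (Spec_num_bouquets arr k d out) := by unfold Spec_num_bouquets; infer_instance

-- ===== CLAIM (what is proved, stated in full; the proofs are below) =====
def Claim_equal_num_bouquets : Prop := ∀ (arr : List Int) (k : Int) (d : Int), Dom_num_bouquets arr k d → Spec_num_bouquets arr k d (num_bouquets arr k d)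

-- ===== LEMMAS AND PROOFS =====

-- total bouquets contributed by the rest of the list, given the current run already has `len` elements
def tot (k d : Int) : List Int → Int → Int
  | [], len => len / k
  | x :: xs, len => if x ≤ d then tot k d xs (len + 1) else len / k + tot k d xs 0

theorem totB (k d : Int) (hk : 0 < k) :
    ∀ (xs : List Int) (runs : List Int) (len : Int),
      (((xs.foldl (fun (s : List Int × Int) x =>
          if x ≤ d then (s.1, s.2 + 1) else (s.1 ++ [s.2], 0)) (runs, len)).1
        ++ [(xs.foldl (fun (s : List Int × Int) x =>
          if x ≤ d then (s.1, s.2 + 1) else (s.1 ++ [s.2], 0)) (runs, len)).2]).map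
          (fun r => PySem.Int.floordiv r k)).sum
      = (runs.map (fun r => PySem.Int.floordiv r k)).sum + tot k d xs len := by
  intro xs
  induction xs with
  | nil =>
    intro runs len
    simp [tot, PySem.Int.floordiv_eq_ediv_of_pos hk]
  | cons x xs ih =>
    intro runs len
    by_cases hx : x ≤ d
    · simp only [List.foldl, hx, if_true, tot]
      exact ih runs (len + 1)
    · simp only [List.foldl, hx, if_false, tot]
      rw [ih (runs ++ [len]) 0]
      simp [PySem.Int.floordiv_eq_ediv_of_pos hk]
      ring

theorem div_succ (k len : Int) (hk : 0 < k) :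
    (if len % k + 1 = k then ((len + 1) % k = 0 ∧ (len + 1) / k = len / k + 1)
     else ((len + 1) % k = len % k + 1 ∧ (len + 1) / k = len / k)) := by
  have h1 : 0 ≤ len % k := Int.emod_nonneg len (by omega)
  have h2 : len % k < k := Int.emod_lt_of_pos len hk
  have h3 : k * (len / k) + len % k = len := Int.mul_ediv_add_emod len k
  split
  · rename_i heq
    have e1 : k * (len / k + 1) = k * (len / k) + k := by ring
    have key : len + 1 = 0 + k * (len / k + 1) := by omega
    have e2 : (len / k + 1) * k = k * (len / k) + k := by ring
    have key2 : len + 1 = 0 + (len / k + 1) * k := by omega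
    constructor
    · rw [key, Int.add_mul_emod_self_left]
      simp
    · rw [key2, Int.add_mul_ediv_right _ _ (by omega : k ≠ 0)]
      simp
  · rename_i hne
    have e1 : (len / k) * k = k * (len / k) := by ring
    have h5 : len + 1 = (len % k + 1) + (len / k) * k := by omega
    constructor
    · rw [h5, Int.add_mul_emod_self_right]
      exact Int.emod_eq_of_lt (by omega) (by omega)
    · rw [h5, Int.add_mul_ediv_right _ _ (by omega : k ≠ 0)]
      rw [Int.ediv_eq_zero_of_lt (by omega) (by omega)]
      omega

theorem totA (k d : Int) (hk : 0 < k) :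
    ∀ (xs : List Int) (b len : Int), 0 ≤ len →
      (xs.foldl (fun (s : Int × Int) x =>
        if x ≤ d then
          let count := s.1 + 1
          if count = k then (0, s.2 + 1) else (count, s.2)
        else (0, s.2)) (len % k, b)).2
      = b + tot k d xs len - len / k := by
  intro xs
  induction xs with
  | nil => intro b len _; simp [tot]
  | cons x xs ih =>
    intro b len hlen
    have hd := div_succ k len hk
    by_cases hx : x ≤ d
    · simp only [List.foldl, hx, if_true]
      by_cases hc : len % k + 1 = k
      · simp only [hc, if_true] at hd ⊢
        have h0 : (0 : Int) = (len + 1) % k := by omega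
        rw [show ((0 : Int), b + 1) = ((len + 1) % k, b + 1) by rw [← h0]]
        rw [ih (b + 1) (len + 1) (by omega)]
        simp [tot, hx]
        omega
      · simp only [hc, if_false] at hd ⊢
        rw [show (len % k + 1, b) = ((len + 1) % k, b) by rw [hd.1]]
        rw [ih b (len + 1) (by omega)]
        simp [tot, hx]
        omega
    · simp only [List.foldl, hx, if_false]
      rw [show ((0 : Int), b) = ((0 : Int) % k, b) by simp]
      rw [ih b 0 le_rfl]
      simp [tot, hx]
      ring

theorem A_zero (k d : Int) (hk : k ≤ 0) :
    ∀ (xs : List Int) (c b : Int), 0 ≤ c →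
      (xs.foldl (fun (s : Int × Int) x =>
        if x ≤ d then
          let count := s.1 + 1
          if count = k then (0, s.2 + 1) else (count, s.2)
        else (0, s.2)) (c, b)).2 = b := by
  intro xs
  induction xs with
  | nil => intro c b _; rfl
  | cons x xs ih =>
    intro c b hc
    by_cases hx : x ≤ d
    · simp only [List.foldl, hx, if_true]
      have : ¬ (c + 1 = k) := by omega
      simp only [this, if_false]
      exact ih (c + 1) b (by omega)
    · simp only [List.foldl, hx, if_false]
      exact ih 0 b le_rfl

-- ===== VERDICT (by name: the statement is the Claim_ definition above) =====
theorem num_bouquets_spec : Claim_equal_num_bouquets := by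
  intro arr k d _
  unfold Spec_num_bouquets num_bouquets num_bouquets_alt
  by_cases hk : k ≤ 0
  · simp only [hk, if_true]
    exact A_zero k d hk arr 0 0 le_rfl
  · have hk' : 0 < k := by omega
    simp only [hk, if_false]
    have hA := totA k d hk' arr 0 0 le_rfl
    simp only [Int.zero_emod] at hA
    rw [hA]
    rw [totB k d hk' arr [] 0]
    simp
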